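-- pv_equiv track=rewrite | github.com/dashinsky/SAT-Project-2022 | backtrack_deepmind.py | count_sat_clauses
-- ===== SOURCE A (Python) =====
-- def count_sat_clauses(wff, stack):
--     '''
--     Returns the number of clauses that are satisfied
--     '''
--     curr_assignment = {}
--     count = 0
--
--     for var in stack:
--         curr_assignment[var[0]] = var[1]
--
--     for clause in wff:
--         for literal in clause:
--             if literal in curr_assignment.keys() and curr_assignment[literal] == 1:
--                 count += 1
--                 break
--             elif literal < 0 and (-literal in curr_assignment.keys()) and curr_assignment[-literal] == 0:
--                 count += 1
--                 break
--
--     return count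
-- ===== SOURCE B (Python) =====
-- def count_sat_clauses(wff, stack):
--     '''
--     Returns the number of clauses that are satisfied
--     '''
--     assignment = {}
--     for var, val in stack:
--         assignment[var] = val
--     # inverted index: literal -> indices of clauses containing it
--     occurs = {}
--     for i, clause in enumerate(wff):
--         for l in clause:
--             occurs.setdefault(l, []).append(i)
--     # a clause is satisfied iff some satisfying literal touches it
--     satisfied = set()
--     for k, v in assignment.items():
--         if v == 1:
--             satisfied.update(occurs.get(k, []))
--         elif v == 0 and k > 0:
--             satisfied.update(occurs.get(-k, []))
--     return len(satisfied)
-- ===== Notes on version B (the rewrite author's own statement) =====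
-- stated objective: alternative
-- what changed: B inverts the traversal: it builds an inverted index from literal to the clause indices containing it, then iterates over the assignment collecting the clause indices touched by any satisfying literal into a set and returns the set's size, instead of A's per-clause literal scan with a counter and break.
import Mathlib
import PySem

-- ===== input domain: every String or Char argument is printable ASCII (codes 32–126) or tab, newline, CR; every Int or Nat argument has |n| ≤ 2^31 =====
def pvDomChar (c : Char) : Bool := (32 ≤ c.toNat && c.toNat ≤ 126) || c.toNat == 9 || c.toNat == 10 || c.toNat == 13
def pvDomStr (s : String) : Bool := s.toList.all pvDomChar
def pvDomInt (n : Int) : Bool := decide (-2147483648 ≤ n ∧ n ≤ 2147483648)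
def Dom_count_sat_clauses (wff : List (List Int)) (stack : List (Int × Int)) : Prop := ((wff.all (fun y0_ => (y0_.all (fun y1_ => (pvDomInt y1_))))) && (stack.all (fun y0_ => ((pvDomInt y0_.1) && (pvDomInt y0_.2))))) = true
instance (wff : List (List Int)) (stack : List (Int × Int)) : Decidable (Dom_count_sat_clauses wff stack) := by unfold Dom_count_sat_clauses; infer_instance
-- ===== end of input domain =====

-- B inverts the traversal: it builds an inverted index literal → clause indices, collects the
-- indices of clauses touched by any satisfying literal into a set, and returns its size,
-- instead of A's per-clause scan over literals with a counter and break (objective: alternative).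

-- ===== PORT A =====
-- inner 'for literal in clause' loop with break: returns true as soon as a branch fires
def pvAClauseSat (d : PySem.Dict Int Int) : List Int → Bool
  | [] => false
  | l :: rest =>
    if d.contains l && (d.getD l 0 == 1) then true
    else if l < 0 && d.contains (-l) && (d.getD (-l) 0 == 0) then true
    else pvAClauseSat d rest

def count_sat_clauses (wff : List (List Int)) (stack : List (Int × Int)) : Int :=
  let curr := stack.foldl (fun d p => d.insert p.1 p.2) (PySem.Dict.empty : PySem.Dict Int Int)
  wff.foldl (fun count clause => if pvAClauseSat curr clause then count + 1 else count) 0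

-- ===== PORT B =====
-- occurs: for i, clause in enumerate(wff): for l in clause: occurs.setdefault(l, []).append(i)
def pvOccurs (wff : List (List Int)) : PySem.Dict Int (List Int) :=
  (PySem.List.enumerate wff).foldl
    (fun d p => p.2.foldl (fun d l => d.modify l [] (fun xs => xs ++ [p.1])) d)
    PySem.Dict.empty

def count_sat_clauses_alt (wff : List (List Int)) (stack : List (Int × Int)) : Int :=
  let assignment := stack.foldl (fun d p => d.insert p.1 p.2) (PySem.Dict.empty : PySem.Dict Int Int)
  let occurs := pvOccurs wff
  let satisfied := assignment.items.foldl
    (fun s p =>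
      if p.2 == 1 then PySem.Set.update s (occurs.getD p.1 [])
      else if p.2 == 0 && decide (0 < p.1) then PySem.Set.update s (occurs.getD (-p.1) [])
      else s)
    PySem.Set.empty
  PySem.Set.len satisfied

-- ===== PRECONDITION & SPEC =====
def Spec_count_sat_clauses (wff : List (List Int)) (stack : List (Int × Int)) (out : Int) : Prop := out = count_sat_clauses_alt wff stack
instance (wff : List (List Int)) (stack : List (Int × Int)) (out : Int) : Decidable (Spec_count_sat_clauses wff stack out) := by unfold Spec_count_sat_clauses; infer_instance

-- ===== CLAIM (what is proved, stated in full; the proofs are below) =====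
def Claim_equal_count_sat_clauses : Prop := ∀ (wff : List (List Int)) (stack : List (Int × Int)), Dom_count_sat_clauses wff stack → Spec_count_sat_clauses wff stack (count_sat_clauses wff stack)

-- ===== LEMMAS AND PROOFS =====

-- a literal satisfies the assignment (as A's two branches read it)
def pvLitSat (d : PySem.Dict Int Int) (l : Int) : Prop :=
  d.get? l = some 1 ∨ (l < 0 ∧ d.get? (-l) = some 0)

-- get? as contains + getD, used to translate A's guarded lookups
lemma get?_eq_some_iff_contains_getD (d : PySem.Dict Int Int) (k v : Int) :
    d.get? k = some v ↔ (d.contains k = true ∧ d.getD k 0 = v) := by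
  rw [PySem.Dict.contains_eq_isSome_get?, PySem.Dict.getD_eq_get?_getD]
  cases h : d.get? k <;> simp

lemma nodup_keys_foldl (stack : List (Int × Int)) (d : PySem.Dict Int Int)
    (hd : d.keys.Nodup) :
    (stack.foldl (fun d p => d.insert p.1 p.2) d).keys.Nodup := by
  induction stack generalizing d with
  | nil => exact hd
  | cons p ps ih => exact ih _ (PySem.Dict.nodup_keys_insert d p.1 p.2 hd)

-- A's per-clause scan fires iff some literal of the clause satisfies the assignment
lemma aClauseSat_iff (d : PySem.Dict Int Int) (c : List Int) :
    pvAClauseSat d c = true ↔ ∃ l ∈ c, pvLitSat d l := by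
  induction c with
  | nil => simp [pvAClauseSat]
  | cons l rest ih =>
    unfold pvAClauseSat
    by_cases h1 : d.contains l && (d.getD l 0 == 1)
    · simp only [h1, if_true, true_iff]
      refine ⟨l, List.mem_cons_self, Or.inl ?_⟩
      rw [get?_eq_some_iff_contains_getD]
      simpa using h1
    · by_cases h2 : l < 0 && d.contains (-l) && (d.getD (-l) 0 == 0)
      · simp only [h1, h2, if_true, if_false, Bool.false_eq_true, true_iff]
        simp only [Bool.and_eq_true, decide_eq_true_eq, beq_iff_eq] at h2
        refine ⟨l, List.mem_cons_self, Or.inr ⟨h2.1.1, ?_⟩⟩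
        rw [get?_eq_some_iff_contains_getD]
        exact ⟨h2.1.2, h2.2⟩
      · simp only [h1, h2, Bool.false_eq_true, if_false, ih]
        constructor
        · rintro ⟨x, hx, hs⟩; exact ⟨x, List.mem_cons_of_mem _ hx, hs⟩
        · rintro ⟨x, hx, hs⟩
          rcases List.mem_cons.mp hx with rfl | hx
          · exfalso
            rcases hs with hget | ⟨hneg, hget⟩
            · rw [get?_eq_some_iff_contains_getD] at hget
              exact h1 (by simp [hget.1, hget.2])
            · rw [get?_eq_some_iff_contains_getD] at hget
              exact h2 (by simp [hneg, hget.1, hget.2])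
          · exact ⟨x, hx, hs⟩

-- the inner 'for l in clause' loop of the index builder
lemma mem_getD_innerOcc (c : List Int) (i : Int) (d : PySem.Dict Int (List Int)) (l j : Int) :
    j ∈ (c.foldl (fun d x => d.modify x [] (fun xs => xs ++ [i])) d).getD l [] ↔
      j ∈ d.getD l [] ∨ (l ∈ c ∧ j = i) := by
  induction c generalizing d with
  | nil => simp
  | cons x c ih =>
    simp only [List.foldl_cons]
    rw [ih, PySem.Dict.getD_modify]
    by_cases hx : l = x
    · subst hx
      simp
      tauto
    · simp [hx]

-- the outer 'for i, clause in enumerate(wff)' loop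
lemma mem_getD_occFold (ps : List (Int × List Int)) (d : PySem.Dict Int (List Int)) (l j : Int) :
    j ∈ (ps.foldl
          (fun d p => p.2.foldl (fun d x => d.modify x [] (fun xs => xs ++ [p.1])) d)
          d).getD l [] ↔
      j ∈ d.getD l [] ∨ ∃ p ∈ ps, l ∈ p.2 ∧ j = p.1 := by
  induction ps generalizing d with
  | nil => simp
  | cons p ps ih =>
    simp only [List.foldl_cons]
    rw [ih, mem_getD_innerOcc]
    simp only [List.exists_mem_cons_iff]
    tauto

lemma mem_pvOccurs (wff : List (List Int)) (l j : Int) :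
    j ∈ (pvOccurs wff).getD l [] ↔
      ∃ p ∈ PySem.List.enumerate wff, l ∈ p.2 ∧ j = p.1 := by
  unfold pvOccurs
  rw [mem_getD_occFold]
  simp [PySem.Dict.getD_empty]

-- membership in the satisfied-index set built over any item list
lemma mem_satFold (ps : List (Int × Int)) (occ : PySem.Dict Int (List Int))
    (s : PySem.Set Int) (j : Int) :
    j ∈ ps.foldl
      (fun s p =>
        if p.2 == 1 then PySem.Set.update s (occ.getD p.1 [])
        else if p.2 == 0 && decide (0 < p.1) then PySem.Set.update s (occ.getD (-p.1) [])
        else s) s ↔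
    j ∈ s ∨ ∃ p ∈ ps,
      (p.2 = 1 ∧ j ∈ occ.getD p.1 []) ∨ (p.2 = 0 ∧ 0 < p.1 ∧ j ∈ occ.getD (-p.1) []) := by
  induction ps generalizing s with
  | nil => simp
  | cons p ps ih =>
    simp only [List.foldl_cons]
    rw [ih]
    simp only [List.exists_mem_cons_iff]
    by_cases h1 : p.2 = 1
    · simp only [h1, beq_self_eq_true, if_true, PySem.Set.mem_update]
      constructor
      · rintro (⟨h | h⟩ | h)
        · exact Or.inl h
        · exact Or.inr (Or.inl (Or.inl ⟨trivial, h⟩))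
        · exact Or.inr (Or.inr h)
      · rintro (h | (⟨_, h⟩ | ⟨hv, _⟩) | h)
        · exact Or.inl (Or.inl h)
        · exact Or.inl (Or.inr h)
        · exact absurd hv (by omega)
        · exact Or.inr h
    · have e1 : (p.2 == 1) = false := by simp [h1]
      by_cases h0 : p.2 = 0 ∧ 0 < p.1
      · have e2 : (p.2 == 0 && decide (0 < p.1)) = true := by simp [h0.1, h0.2]
        simp only [e1, Bool.false_eq_true, if_false, e2, if_true, PySem.Set.mem_update]
        constructor
        · rintro (⟨h | h⟩ | h)
          · exact Or.inl h
          · exact Or.inr (Or.inl (Or.inr ⟨h0.1, h0.2, h⟩))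
          · exact Or.inr (Or.inr h)
        · rintro (h | (⟨hv, _⟩ | ⟨_, _, h⟩) | h)
          · exact Or.inl (Or.inl h)
          · exact absurd hv h1
          · exact Or.inl (Or.inr h)
          · exact Or.inr h
      · have e2 : (p.2 == 0 && decide (0 < p.1)) = false := by
          simp only [Bool.and_eq_false_iff, beq_eq_false_iff_ne, ne_eq,
            decide_eq_false_iff_not, not_lt]
          by_cases hz : p.2 = 0
          · exact Or.inr (by have := fun hp => h0 ⟨hz, hp⟩; omega)
          · exact Or.inl hz
        simp only [e1, Bool.false_eq_true, if_false, e2]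
        constructor
        · rintro (h | h)
          · exact Or.inl h
          · exact Or.inr (Or.inr h)
        · rintro (h | (⟨hv, _⟩ | ⟨hv, hp, _⟩) | h)
          · exact Or.inl h
          · exact absurd hv h1
          · exact absurd ⟨hv, hp⟩ h0
          · exact Or.inr h

-- the set's members, through the assignment dict (keys unique)
lemma mem_satisfied_iff (d : PySem.Dict Int Int) (hd : d.keys.Nodup)
    (occ : PySem.Dict Int (List Int)) (j : Int) :
    j ∈ d.items.foldl
      (fun s p =>
        if p.2 == 1 then PySem.Set.update s (occ.getD p.1 [])
        else if p.2 == 0 && decide (0 < p.1) then PySem.Set.update s (occ.getD (-p.1) [])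
        else s) PySem.Set.empty ↔
    ∃ l, pvLitSat d l ∧ j ∈ occ.getD l [] := by
  rw [mem_satFold]
  simp only [PySem.Set.empty, List.not_mem_nil, false_or]
  constructor
  · rintro ⟨⟨k, v⟩, hmem, h⟩
    rcases h with ⟨hv, hj⟩ | ⟨hv, hk, hj⟩
    · simp only at hv hj
      subst hv
      exact ⟨k, Or.inl (PySem.Dict.get?_of_mem_items d hmem hd), hj⟩
    · simp only at hv hk hj
      subst hv
      refine ⟨-k, Or.inr ⟨by omega, ?_⟩, by simpa using hj⟩
      rw [neg_neg]
      exact PySem.Dict.get?_of_mem_items d hmem hd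
  · rintro ⟨l, hl | ⟨hneg, hl⟩, hj⟩
    · exact ⟨(l, 1), PySem.Dict.mem_items_of_get?_eq_some d hl, Or.inl ⟨rfl, hj⟩⟩
    · exact ⟨(-l, 0), PySem.Dict.mem_items_of_get?_eq_some d hl,
        Or.inr ⟨rfl, by omega, by simpa using hj⟩⟩

-- the satisfied set stays duplicate-free
lemma nodup_satFold (ps : List (Int × Int)) (occ : PySem.Dict Int (List Int))
    (s : PySem.Set Int) (hs : s.Nodup) :
    (ps.foldl
      (fun s p =>
        if p.2 == 1 then PySem.Set.update s (occ.getD p.1 [])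
        else if p.2 == 0 && decide (0 < p.1) then PySem.Set.update s (occ.getD (-p.1) [])
        else s) s).Nodup := by
  induction ps generalizing s with
  | nil => exact hs
  | cons p ps ih =>
    simp only [List.foldl_cons]
    apply ih
    split_ifs <;> first
      | exact PySem.Set.nodup_update _ _ hs
      | exact hs

-- the candidate list of satisfied clause indices, read off the enumeration
lemma countP_length (wff : List (List Int)) (d : PySem.Dict Int Int) :
    (((PySem.List.enumerate wff).filter (fun p => pvAClauseSat d p.2)).map (·.1)).length
      = wff.countP (pvAClauseSat d) := by
  rw [List.length_map, ← List.countP_eq_length_filter]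
  conv_rhs => rw [← PySem.List.map_snd_enumerate wff 0, List.countP_map]
  rfl

lemma nodup_candidates (wff : List (List Int)) (d : PySem.Dict Int Int) :
    (((PySem.List.enumerate wff).filter (fun p => pvAClauseSat d p.2)).map (·.1)).Nodup := by
  have h := (PySem.List.pairwise_lt_enumerate wff 0).filter (fun p => pvAClauseSat d p.2)
  rw [List.nodup_iff_pairwise_ne]
  rw [List.pairwise_map]
  exact h.imp (fun hlt => by omega)

-- size of the satisfied-index set equals A's clause count, for any nodup-key assignment
lemma satSet_len_eq (wff : List (List Int)) (d : PySem.Dict Int Int) (hd : d.keys.Nodup) :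
    PySem.Set.len (d.items.foldl
      (fun s p =>
        if p.2 == 1 then PySem.Set.update s ((pvOccurs wff).getD p.1 [])
        else if p.2 == 0 && decide (0 < p.1) then PySem.Set.update s ((pvOccurs wff).getD (-p.1) [])
        else s) PySem.Set.empty) = (wff.countP (pvAClauseSat d) : Int) := by
  set sat := d.items.foldl
    (fun s p =>
      if p.2 == 1 then PySem.Set.update s ((pvOccurs wff).getD p.1 [])
      else if p.2 == 0 && decide (0 < p.1) then PySem.Set.update s ((pvOccurs wff).getD (-p.1) [])
      else s) PySem.Set.empty with hsat
  set L := ((PySem.List.enumerate wff).filter (fun p => pvAClauseSat d p.2)).map (·.1) with hL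
  have hmem : ∀ j, j ∈ sat ↔ j ∈ L := by
    intro j
    rw [hsat, mem_satisfied_iff d hd, hL]
    simp only [List.mem_map, List.mem_filter]
    constructor
    · rintro ⟨l, hls, hj⟩
      rw [mem_pvOccurs] at hj
      obtain ⟨p, hp, hlp, rfl⟩ := hj
      exact ⟨p, ⟨hp, (aClauseSat_iff d p.2).mpr ⟨l, hlp, hls⟩⟩, rfl⟩
    · rintro ⟨p, ⟨hp, hc⟩, rfl⟩
      obtain ⟨l, hlp, hls⟩ := (aClauseSat_iff d p.2).mp hc
      exact ⟨l, hls, (mem_pvOccurs wff l p.1).mpr ⟨p, hp, hlp, rfl⟩⟩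
  have hperm : sat.Perm L :=
    (List.perm_ext_iff_of_nodup
      (nodup_satFold _ _ _ (by simp [PySem.Set.empty]))
      (nodup_candidates wff d)).mpr hmem
  simp only [PySem.Set.len, hperm.length_eq, hL, countP_length]

-- ===== VERDICT (by name: the statement is the Claim_ definition above) =====
theorem count_sat_clauses_spec : Claim_equal_count_sat_clauses := by
  intro wff stack _
  unfold Spec_count_sat_clauses count_sat_clauses count_sat_clauses_alt
  simp only []
  rw [PySem.List.foldl_if_add_one,
    satSet_len_eq wff _ (nodup_keys_foldl stack _ PySem.Dict.nodup_keys_empty)]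
  simp
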